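-- pv_equiv track=rewrite | github.com/rolan2kn/aaai2024_etd_src | utilities/persistence_diagram_helper.py | equalize_homology_groups
-- ===== SOURCE A (Python) =====
-- def equalize_homology_groups(A, B):
--     siA = len(A)
--     siB = len(B)
--     A = [list(A[i]) for i in range(siA)]
--     B = [list(B[i]) for i in range(siB)]
--
--     max_dim = max(siA, siB)
--     min_dim = min(siA, siB)
--
--     for d in range(min_dim):
--         siAd = len(A[d])
--         siBd = len(B[d])
--
--         if siBd > siAd:
--             A[d].extend([0] * (siBd - siAd))
--         elif siAd > siBd:
--             B[d].extend([0] * (siAd - siBd))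
--
--     _AA = A if min_dim == siA else B
--     _BB = B if max_dim == siB else A
--     for d in range(min_dim, max_dim):
--         _AA.append([0] * len(_BB[d]))
--
--     return _AA, _BB
-- ===== SOURCE B (Python) =====
-- def equalize_homology_groups(A, B):
--     ia, ib = iter(A), iter(B)
--     AA, BB = [], []
--     while True:
--         ax = next(ia, None)
--         bx = next(ib, None)
--         if ax is None and bx is None:
--             break
--         hx = list(ax) if ax is not None else []
--         hy = list(bx) if bx is not None else []
--         w = max(len(hx), len(hy))
--         AA.append(hx + [0] * (w - len(hx)))
--         BB.append(hy + [0] * (w - len(hy)))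
--     return (AA, BB) if len(A) <= len(B) else (BB, AA)
-- ===== Notes on version B (the rewrite author's own statement) =====
-- stated objective: alternative
-- what changed: Replaces A's two staged index loops with in-place mutation and aliasing-based swap (pad rows up to min_dim, then append zero rows to the shorter list) by one simultaneous pairwise traversal of both lists with a uniform rule (a missing row is treated as empty, both rows padded to their common width in the same step), building both outputs fresh with the order swap done once at the return.
import Mathlib
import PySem

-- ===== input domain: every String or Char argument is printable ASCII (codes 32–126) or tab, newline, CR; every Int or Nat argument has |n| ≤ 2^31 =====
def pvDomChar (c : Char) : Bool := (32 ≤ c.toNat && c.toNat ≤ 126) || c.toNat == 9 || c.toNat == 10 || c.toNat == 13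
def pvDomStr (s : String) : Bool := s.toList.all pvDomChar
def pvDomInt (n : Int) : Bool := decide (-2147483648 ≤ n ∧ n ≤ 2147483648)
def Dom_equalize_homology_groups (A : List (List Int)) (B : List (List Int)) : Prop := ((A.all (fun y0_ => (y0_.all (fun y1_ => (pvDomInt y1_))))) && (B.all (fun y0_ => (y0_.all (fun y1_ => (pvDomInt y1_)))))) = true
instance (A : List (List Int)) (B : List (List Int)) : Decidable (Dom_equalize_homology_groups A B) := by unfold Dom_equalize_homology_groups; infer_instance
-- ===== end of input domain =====

-- B replaces A's two staged index loops with in-place mutation by one simultaneous pairwise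
-- traversal of both lists (missing row = empty, both rows padded to the common width in one step);
-- same cost, different decomposition. Both programs are total. (Python A mutates only its local
-- row copies; the caller's arguments are unchanged.)

-- ===== PORT A =====
-- loop body of A's first per-dimension padding loop (pads A[d] or B[d] up to the longer of the two)
def pvStepAB (p : List (List Int) × List (List Int)) (d : Int) : List (List Int) × List (List Int) :=
  let Ad := PySem.List.pyGetD p.1 d []
  let Bd := PySem.List.pyGetD p.2 d []
  if Bd.length > Ad.length then (p.1.set d.toNat (Ad ++ List.replicate (Bd.length - Ad.length) 0), p.2)
  else if Ad.length > Bd.length then (p.1, p.2.set d.toNat (Bd ++ List.replicate (Ad.length - Bd.length) 0))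
  else p

def equalize_homology_groups (A : List (List Int)) (B : List (List Int)) : List (List Int) × List (List Int) :=
  let siA : Int := A.length
  let siB : Int := B.length
  let A1 : List (List Int) := (PySem.List.pyRange 0 siA 1).map (fun i => PySem.List.pyGetD A i [])
  let B1 : List (List Int) := (PySem.List.pyRange 0 siB 1).map (fun i => PySem.List.pyGetD B i [])
  let max_dim : Int := max siA siB
  let min_dim : Int := min siA siB
  let p := (PySem.List.pyRange 0 min_dim 1).foldl pvStepAB (A1, B1)
  let _AA := if min_dim = siA then p.1 else p.2
  let _BB := if max_dim = siB then p.2 else p.1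
  let _AA2 := (PySem.List.pyRange min_dim max_dim 1).foldl
      (fun acc d => acc ++ [List.replicate (PySem.List.pyGetD _BB d []).length 0]) _AA
  (_AA2, _BB)

-- ===== PORT B =====
-- the body of B's while-loop: one step pads both current rows to their common width
def pvBody (hx hy : List Int) (p : List (List Int) × List (List Int)) :
    List (List Int) × List (List Int) :=
  let w := max hx.length hy.length
  ((hx ++ List.replicate (w - hx.length) 0) :: p.1,
   (hy ++ List.replicate (w - hy.length) 0) :: p.2)

-- B's while-loop consuming both iterators simultaneously (a missing row is the empty row)
def pvGo : List (List Int) → List (List Int) → List (List Int) × List (List Int)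
  | [], [] => ([], [])
  | x :: xs, y :: ys => pvBody x y (pvGo xs ys)
  | x :: xs, [] => pvBody x [] (pvGo xs [])
  | [], y :: ys => pvBody [] y (pvGo [] ys)

def equalize_homology_groups_alt (A : List (List Int)) (B : List (List Int)) : List (List Int) × List (List Int) :=
  let p := pvGo A B
  if A.length ≤ B.length then p else (p.2, p.1)

-- ===== PRECONDITION & SPEC =====
def Spec_equalize_homology_groups (A : List (List Int)) (B : List (List Int)) (out : List (List Int) × List (List Int)) : Prop := out = equalize_homology_groups_alt A B
instance (A : List (List Int)) (B : List (List Int)) (out : List (List Int) × List (List Int)) : Decidable (Spec_equalize_homology_groups A B out) := by unfold Spec_equalize_homology_groups; infer_instance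

-- ===== CLAIM (what is proved, stated in full; the proofs are below) =====
def Claim_equal_equalize_homology_groups : Prop := ∀ (A : List (List Int)) (B : List (List Int)), Dom_equalize_homology_groups A B → Spec_equalize_homology_groups A B (equalize_homology_groups A B)

-- ===== LEMMAS AND PROOFS =====

def pvPadTo (r : List Int) (w : Nat) : List Int := r ++ List.replicate (w - r.length) 0

def pvPadAll (X Y : List (List Int)) (n : Nat) : List (List Int) :=
  X.mapIdx (fun d r => if d < n then pvPadTo r (max r.length ((Y.getD d []).length)) else r)

theorem pv_set_getD (l : List (List Int)) (n : Nat) : l.set n (l.getD n []) = l := by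
  rcases Nat.lt_or_ge n l.length with h | h
  · rw [List.getD_eq_getElem l [] h]; exact List.set_getElem_self h
  · rw [List.getD_eq_default l [] h]; exact List.set_eq_of_length_le h

theorem pv_set_getD' (l : List (List Int)) (n : Nat) : l.set n (l[n]?.getD []) = l :=
  pv_set_getD l n

theorem pvStepAB_eq (p : List (List Int) × List (List Int)) (n : Nat) :
    pvStepAB p (n : Int) =
      (p.1.set n (pvPadTo (p.1.getD n []) (max (p.1.getD n []).length (p.2.getD n []).length)),
       p.2.set n (pvPadTo (p.2.getD n []) (max (p.1.getD n []).length (p.2.getD n []).length))) := by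
  simp only [pvStepAB, PySem.List.pyGetD_natCast, Int.toNat_natCast]
  rcases Nat.lt_trichotomy (p.1.getD n []).length (p.2.getD n []).length with h | h | h
  · have hm : max (p.1.getD n []).length (p.2.getD n []).length = (p.2.getD n []).length :=
      Nat.max_eq_right (Nat.le_of_lt h)
    simp only [gt_iff_lt, h, if_pos, pvPadTo, hm, Nat.sub_self, List.replicate_zero,
      List.append_nil, pv_set_getD]
  · simp only [gt_iff_lt, h, lt_irrefl, pvPadTo, Nat.max_self, Nat.sub_self,
      List.replicate_zero, List.append_nil]
    simp [pv_set_getD']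
  · have hm : max (p.1.getD n []).length (p.2.getD n []).length = (p.1.getD n []).length :=
      Nat.max_eq_left (Nat.le_of_lt h)
    have h2 : ¬ (p.1.getD n []).length < (p.2.getD n []).length := by omega
    simp only [gt_iff_lt, h, h2, if_neg, if_pos, pvPadTo, hm, Nat.sub_self, List.replicate_zero,
      List.append_nil, pv_set_getD, not_false_iff]

theorem pvPadAll_length (X Y : List (List Int)) (n : Nat) : (pvPadAll X Y n).length = X.length := by
  simp [pvPadAll]

theorem pvPadAll_getD_ge (X Y : List (List Int)) (n d : Nat) (h : n ≤ d) :
    (pvPadAll X Y n).getD d [] = X.getD d [] := by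
  rcases Nat.lt_or_ge d X.length with hd | hd
  · have hd' : d < (pvPadAll X Y n).length := by rw [pvPadAll_length]; exact hd
    rw [List.getD_eq_getElem _ [] hd', List.getD_eq_getElem _ [] hd]
    simp only [pvPadAll, List.getElem_mapIdx]
    rw [if_neg (by omega)]
  · rw [List.getD_eq_default _ [] (by rw [pvPadAll_length]; exact hd),
        List.getD_eq_default _ [] hd]

theorem pvPadAll_set (X Y : List (List Int)) (n : Nat) :
    (pvPadAll X Y n).set n
        (pvPadTo (X.getD n []) (max (X.getD n []).length ((Y.getD n []).length))) =
      pvPadAll X Y (n + 1) := by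
  rcases Nat.lt_or_ge n X.length with hn | hn
  · apply List.ext_getElem
    · simp [pvPadAll]
    · intro i h1 h2
      have hi : i < X.length := by simpa [pvPadAll] using h2
      rw [List.getElem_set]
      by_cases hin : i = n
      · subst hin
        rw [if_pos rfl]
        simp only [pvPadAll, List.getElem_mapIdx, if_pos (Nat.lt_succ_self i)]
        rw [List.getD_eq_getElem _ [] hi]
      · rw [if_neg (by omega : ¬ n = i)]
        simp only [pvPadAll, List.getElem_mapIdx]
        have hiff : (i < n) ↔ (i < n + 1) := by omega
        simp only [hiff]
  · rw [List.set_eq_of_length_le (by rw [pvPadAll_length]; exact hn)]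
    apply List.ext_getElem
    · simp [pvPadAll]
    · intro i h1 h2
      have hi : i < X.length := by simpa [pvPadAll] using h1
      simp only [pvPadAll, List.getElem_mapIdx]
      have hiff : (i < n) ↔ (i < n + 1) := by omega
      simp only [hiff]

theorem pvFold_spec (X Y : List (List Int)) (n : Nat) :
    (List.range n).foldl (fun p (k : Nat) => pvStepAB p (k : Int)) (X, Y) =
      (pvPadAll X Y n, pvPadAll Y X n) := by
  induction n with
  | zero =>
    have hz : ∀ (U V : List (List Int)), pvPadAll U V 0 = U := by
      intro U V
      apply List.ext_getElem
      · simp [pvPadAll]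
      · intro i h1 h2; simp [pvPadAll, List.getElem_mapIdx]
    simp [hz]
  | succ n ih =>
    rw [List.range_succ, List.foldl_append, ih, List.foldl_cons, List.foldl_nil, pvStepAB_eq]
    simp only
    rw [pvPadAll_getD_ge X Y n n le_rfl, pvPadAll_getD_ge Y X n n le_rfl]
    rw [pvPadAll_set X Y n]
    rw [Nat.max_comm]
    rw [pvPadAll_set Y X n]

-- characterisation of B's traversal: lengths and per-index rows
theorem pvGo_lengths (X Y : List (List Int)) :
    (pvGo X Y).1.length = max X.length Y.length ∧
    (pvGo X Y).2.length = max X.length Y.length := by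
  fun_induction pvGo X Y with
  | case1 => simp
  | case2 x xs y ys ih => simp [pvBody, ih.1, ih.2]
  | case3 x xs ih => simp [pvBody, ih.1, ih.2]
  | case4 y ys ih => simp [pvBody, ih.1, ih.2]

theorem pvGo_getD (X Y : List (List Int)) (d : Nat) (hd : d < max X.length Y.length) :
    (pvGo X Y).1.getD d [] =
      pvPadTo (X.getD d []) (max (X.getD d []).length ((Y.getD d []).length)) ∧
    (pvGo X Y).2.getD d [] =
      pvPadTo (Y.getD d []) (max (X.getD d []).length ((Y.getD d []).length)) := by
  fun_induction pvGo X Y generalizing d with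
  | case1 => simp at hd
  | case2 x xs y ys ih =>
    cases d with
    | zero => simp [pvBody, pvPadTo]
    | succ d =>
      have hd' : d < max xs.length ys.length := by simp at hd; omega
      have := ih d hd'
      simpa [pvBody] using this
  | case3 x xs ih =>
    cases d with
    | zero => simp [pvBody, pvPadTo]
    | succ d =>
      have hd' : d < max xs.length ([] : List (List Int)).length := by simp at hd ⊢; omega
      have := ih d hd'
      simpa [pvBody] using this
  | case4 y ys ih =>
    cases d with
    | zero => simp [pvBody, pvPadTo]
    | succ d =>
      have hd' : d < max ([] : List (List Int)).length ys.length := by simp at hd ⊢; omega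
      have := ih d hd'
      simpa [pvBody] using this

-- the long side of A's result equals the corresponding component of pvGo (X shorter or equal)
theorem pvLong (X Y : List (List Int)) (h : X.length ≤ Y.length) :
    pvPadAll Y X X.length = (pvGo X Y).2 := by
  apply List.ext_getElem
  · rw [pvPadAll_length, (pvGo_lengths X Y).2]; omega
  · intro i h1 h2
    have hi : i < Y.length := by rwa [pvPadAll_length] at h1
    have him : i < max X.length Y.length := by omega
    rw [← List.getD_eq_getElem _ [] h1, ← List.getD_eq_getElem _ [] h2,
        (pvGo_getD X Y i him).2]
    have hYget : (pvPadAll Y X X.length).getD i [] =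
        if i < X.length then
          pvPadTo (Y.getD i []) (max (Y.getD i []).length ((X.getD i []).length))
        else Y.getD i [] := by
      rw [List.getD_eq_getElem _ [] h1]
      simp only [pvPadAll, List.getElem_mapIdx]
      rw [List.getD_eq_getElem _ [] hi]
    rw [hYget]
    by_cases hx : i < X.length
    · rw [if_pos hx, pvPadTo, pvPadTo, Nat.max_comm]
    · rw [if_neg hx, List.getD_eq_default X [] (by omega)]
      simp [pvPadTo]

-- the short side of A's result equals the corresponding component of pvGo (X shorter or equal)
theorem pvShort (X Y : List (List Int)) (h : X.length ≤ Y.length) :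
    pvPadAll X Y X.length ++
      (PySem.List.pyRange (X.length : Int) (Y.length : Int) 1).map
        (fun d => List.replicate (PySem.List.pyGetD (pvPadAll Y X X.length) d []).length 0)
      = (pvGo X Y).1 := by
  have hmap : (PySem.List.pyRange (X.length : Int) (Y.length : Int) 1).map
        (fun d => List.replicate (PySem.List.pyGetD (pvPadAll Y X X.length) d []).length (0 : Int))
      = (List.range (Y.length - X.length)).map
          (fun k => List.replicate ((Y.getD (X.length + k) []).length) (0 : Int)) := by
    rw [PySem.List.pyRange_one, List.map_map]
    have ht : ((Y.length : Int) - (X.length : Int)).toNat = Y.length - X.length := by omega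
    rw [ht]
    apply List.map_congr_left
    intro k hk
    simp only [Function.comp]
    have hc : ((X.length : Int) + (k : Int)) = ((X.length + k : Nat) : Int) := by push_cast; ring
    rw [hc, PySem.List.pyGetD_natCast, pvPadAll_getD_ge Y X _ _ (Nat.le_add_right _ _)]
  rw [hmap]
  apply List.ext_getElem
  · simp only [List.length_append, pvPadAll_length, List.length_map, List.length_range,
      (pvGo_lengths X Y).1]
    omega
  · intro i h1 h2
    have hiY : i < Y.length := by
      rw [(pvGo_lengths X Y).1] at h2; omega
    have him : i < max X.length Y.length := by omega
    rw [← List.getD_eq_getElem _ [] h2, (pvGo_getD X Y i him).1]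
    rw [List.getElem_append]
    split
    · rename_i hi
      have hix : i < X.length := by rwa [pvPadAll_length] at hi
      simp only [pvPadAll, List.getElem_mapIdx, if_pos hix]
      rw [List.getD_eq_getElem X [] hix]
    · rename_i hi
      have hix : ¬ i < X.length := by rwa [pvPadAll_length] at hi
      rw [List.getElem_map, List.getElem_range]
      have hidx : X.length + (i - (pvPadAll X Y X.length).length) = i := by
        rw [pvPadAll_length]; omega
      rw [hidx, List.getD_eq_default X [] (by omega)]
      simp [pvPadTo]

-- pvGo is symmetric up to swapping components
theorem pvGo_swap (X Y : List (List Int)) :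
    (pvGo Y X).1 = (pvGo X Y).2 ∧ (pvGo Y X).2 = (pvGo X Y).1 := by
  fun_induction pvGo X Y with
  | case1 => simp [pvGo]
  | case2 x xs y ys ih => simp [pvGo, pvBody, ih.1, ih.2, Nat.max_comm]
  | case3 x xs ih => simp [pvGo, pvBody, ih.1, ih.2]
  | case4 y ys ih => simp [pvGo, pvBody, ih.1, ih.2]

theorem pv_main (A B : List (List Int)) :
    equalize_homology_groups A B = equalize_homology_groups_alt A B := by
  unfold equalize_homology_groups equalize_homology_groups_alt
  simp only [PySem.List.map_pyGetD_pyRange_zero']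
  by_cases hle : A.length ≤ B.length
  · have hmin : min (A.length : Int) (B.length : Int) = ((A.length : Nat) : Int) := by
      simp; omega
    have hmax : max (A.length : Int) (B.length : Int) = ((B.length : Nat) : Int) := by
      simp; omega
    rw [hmin, hmax, if_pos rfl, if_pos rfl, PySem.List.pyRange_zero_nat, List.foldl_map,
        pvFold_spec, PySem.List.foldl_append_singleton_eq_map, if_pos hle]
    exact Prod.ext (pvShort A B hle) (pvLong A B hle)
  · have hlt : B.length < A.length := Nat.lt_of_not_le hle
    have hmin : min (A.length : Int) (B.length : Int) = ((B.length : Nat) : Int) := by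
      simp; omega
    have hmax : max (A.length : Int) (B.length : Int) = ((A.length : Nat) : Int) := by
      simp; omega
    rw [hmin, hmax, if_neg (by exact_mod_cast Nat.ne_of_gt hlt),
        if_neg (by exact_mod_cast Nat.ne_of_lt hlt), PySem.List.pyRange_zero_nat, List.foldl_map,
        pvFold_spec, PySem.List.foldl_append_singleton_eq_map, if_neg hle]
    have h := Nat.le_of_lt hlt
    refine Prod.ext ?_ ?_
    · rw [(pvGo_swap A B).1.symm]
      exact pvShort B A h
    · rw [(pvGo_swap A B).2.symm]
      exact pvLong B A h

-- ===== VERDICT (by name: the statement is the Claim_ definition above) =====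
theorem equalize_homology_groups_spec : Claim_equal_equalize_homology_groups := by
  intro A B _
  unfold Spec_equalize_homology_groups
  exact pv_main A B
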